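-- pv_equiv track=rewrite | github.com/KoMinjae/codingtest | 셀프넘버.py | solution
-- ===== SOURCE A (Python) =====
-- def solution(a):
--     selfnum=[0 for i in range(a)]
--     selfnum[1] = 0
--     for i in range(1,a):
--         checknum=i
--         for j in str(i):
--             checknum+=int(j)
--         if checknum <=a:
--             selfnum[checknum-1]+=1
--     return selfnum[a-1]
-- ===== SOURCE B (Python) =====
-- def solution(a):
--     def digitsum(i):
--         s = 0
--         for j in str(i):
--             s += int(j)
--         return s
--     lo = max(1, a - 9 * len(str(a)))
--     count = 0
--     for i in range(lo, a):
--         if i + digitsum(i) == a: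
--             count += 1
--     return count
-- ===== Notes on version B (the rewrite author's own statement) =====
-- stated objective: faster
-- what changed: Instead of filling an O(a) counting array over all i in range(1,a), B scans only the window [max(1, a-9*len(str(a))), a) - the only i whose digit-augmented value can equal a - and counts direct matches.
import Mathlib
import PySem

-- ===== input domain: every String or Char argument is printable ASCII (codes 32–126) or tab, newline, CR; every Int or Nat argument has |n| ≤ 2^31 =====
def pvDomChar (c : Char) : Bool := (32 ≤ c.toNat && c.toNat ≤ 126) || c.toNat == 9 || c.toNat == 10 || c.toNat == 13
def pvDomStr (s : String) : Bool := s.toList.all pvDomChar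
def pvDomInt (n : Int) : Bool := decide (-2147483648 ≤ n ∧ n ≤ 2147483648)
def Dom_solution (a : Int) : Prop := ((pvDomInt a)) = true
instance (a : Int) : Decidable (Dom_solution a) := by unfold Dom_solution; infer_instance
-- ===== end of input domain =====

-- B skips A's counting-array pass over all of range(1, a) and scans only the short window
-- [max(1, a-9*len(str(a))), a) that can contain generators of a (measured faster at the large sizes).
-- A raises IndexError for a <= 1 (list of length < 2); those inputs are excluded by Pre_.

-- ===== PORT A =====
-- int(j) for a one-character string j; in both programs j is always a decimal digit, so the
-- default 0 is never used on the admitted inputs.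
def pyDig (j : Char) : Int := (PySem.Int.ofChars? [j]).getD 0

-- Python list get/set with an Int index, as this program uses them (Array for Python's O(1)
-- element access): its indices are never negative (i >= 1 so checknum-1 >= 0), so no wraparound
-- case is needed; out-of-range = IndexError, excluded by Pre_ (the default / no-op branches are
-- unreachable on admitted inputs).
def pyArrGetD (xs : Array Int) (i : Int) (d : Int) : Int :=
  if h : 0 ≤ i ∧ i.toNat < xs.size then xs[i.toNat] else d

def pyArrSetD (xs : Array Int) (i : Int) (v : Int) : Array Int :=
  if h : 0 ≤ i ∧ i.toNat < xs.size then xs.set i.toNat v h.2 else xs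

-- Python's augmented assignment xs[i] += 1 (one read-modify-write statement)
def pyArrIncD (xs : Array Int) (i : Int) : Array Int :=
  if h : 0 ≤ i ∧ i.toNat < xs.size then xs.set i.toNat (xs[i.toNat] + 1) h.2 else xs

def solution (a : Int) : Int :=
  -- selfnum = [0 for i in range(a)]  (a zeros)
  let selfnum0 : Array Int := Array.replicate a.toNat 0
  -- selfnum[1] = 0  (IndexError when a <= 1: excluded by Pre_)
  let selfnum1 := pyArrSetD selfnum0 1 0
  -- for i in range(1, a): checknum = i; for j in str(i): checknum += int(j); if checknum <= a: selfnum[checknum-1] += 1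
  let final := (PySem.List.pyRange 1 a).foldl
    (fun sn i =>
      let checknum := (PySem.Int.toStr i).toList.foldl (fun c j => c + pyDig j) i
      if checknum ≤ a then pyArrIncD sn (checknum - 1)
      else sn)
    selfnum1
  -- return selfnum[a-1]  (in range whenever a >= 2)
  pyArrGetD final (a - 1) 0

-- ===== PORT B =====
-- def digitsum(i): s = 0; for j in str(i): s += int(j); return s
def digitsum (i : Int) : Int :=
  (PySem.Int.toStr i).toList.foldl (fun s j => s + pyDig j) 0

def solution_alt (a : Int) : Int :=
  -- lo = max(1, a - 9 * len(str(a)))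
  let lo : Int := max 1 (a - 9 * PySem.Str.len (PySem.Int.toStr a))
  -- count = 0; for i in range(lo, a): if i + digitsum(i) == a: count += 1
  (PySem.List.pyRange lo a).foldl
    (fun count i => if i + digitsum i == a then count + 1 else count) 0

-- ===== PRECONDITION & SPEC =====
-- Pre_ excludes exactly a <= 1, on which A raises IndexError (selfnum[1] on a list of length < 2).
def Pre_solution (a : Int) : Prop := 2 ≤ a
instance (a : Int) : Decidable (Pre_solution a) := by unfold Pre_solution; infer_instance
def pvWitness_solution : Int := 10

def Spec_solution (a : Int) (out : Int) : Prop := out = solution_alt a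
instance (a : Int) (out : Int) : Decidable (Spec_solution a out) := by unfold Spec_solution; infer_instance

-- ===== CLAIM (what is proved, stated in full; the proofs are below) =====
def Claim_equal_solution : Prop := ∀ (a : Int), Dom_solution a → Pre_solution a → Spec_solution a (solution a)

-- ===== LEMMAS AND PROOFS =====

-- every character produced by Nat.toDigits 10 is some digitChar d with d < 10
theorem mem_toDigits_ten (n : Nat) :
    ∀ c ∈ Nat.toDigits 10 n, ∃ d, d < 10 ∧ c = Nat.digitChar d := by
  induction n using Nat.strong_induction_on with
  | _ n ih =>
    rw [Nat.toDigits_eq_if (by norm_num)]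
    split
    · rename_i h
      intro c hc
      simp at hc
      exact ⟨n, h, hc⟩
    · rename_i h
      intro c hc
      rcases List.mem_append.1 hc with h1 | h1
      · exact ih (n / 10) (Nat.div_lt_self (by omega) (by norm_num)) c h1
      · simp at h1
        exact ⟨n % 10, Nat.mod_lt _ (by norm_num), h1⟩

theorem pyDig_digitChar {d : Nat} (hd : d < 10) : pyDig (Nat.digitChar d) = (d : Int) := by
  interval_cases d <;> decide

theorem pyDig_bounds {c : Char} (h : ∃ d, d < 10 ∧ c = Nat.digitChar d) :
    0 ≤ pyDig c ∧ pyDig c ≤ 9 := by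
  obtain ⟨d, hd, rfl⟩ := h
  rw [pyDig_digitChar hd]
  omega

-- digit-sum bounds for a list of digit characters
theorem sum_pyDig_bounds (l : List Char) (h : ∀ c ∈ l, ∃ d, d < 10 ∧ c = Nat.digitChar d) :
    0 ≤ (l.map pyDig).sum ∧ (l.map pyDig).sum ≤ 9 * l.length := by
  induction l with
  | nil => simp
  | cons c t ih =>
    have hc := pyDig_bounds (h c (by simp))
    have ht := ih (fun x hx => h x (by simp [hx]))
    simp only [List.map_cons, List.sum_cons, List.length_cons]
    push_cast
    omega

-- length of the decimal representation is monotone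
theorem toDigits_len_mono {m n : Nat} (h : m ≤ n) :
    (Nat.toDigits 10 m).length ≤ (Nat.toDigits 10 n).length := by
  have hk : 0 < (Nat.toDigits 10 n).length := Nat.length_toDigits_pos
  have hn : n < 10 ^ (Nat.toDigits 10 n).length :=
    (Nat.length_toDigits_le_iff (by norm_num) hk).1 le_rfl
  exact (Nat.length_toDigits_le_iff (by norm_num) hk).2 (lt_of_le_of_lt h hn)

-- the digit sum of i as both programs compute it
def dsum (i : Int) : Int := ((PySem.Int.toStr i).toList.map pyDig).sum

theorem digitsum_eq (i : Int) : digitsum i = dsum i := by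
  unfold digitsum dsum
  rw [PySem.List.foldl_add]
  simp

theorem dsum_bounds {i : Int} (hi : 1 ≤ i) :
    0 ≤ dsum i ∧ dsum i ≤ 9 * ((Nat.toDigits 10 i.toNat).length : Int) := by
  unfold dsum
  rw [PySem.Int.toList_toStr]
  unfold PySem.Int.toChars
  rw [if_neg (by omega)]
  have := sum_pyDig_bounds (Nat.toDigits 10 i.toNat) (mem_toDigits_ten i.toNat)
  omega

-- array helpers behave like Python's get/set at nonnegative indices
theorem size_pyArrSetD (xs : Array Int) (i v : Int) : (pyArrSetD xs i v).size = xs.size := by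
  unfold pyArrSetD; split <;> simp

theorem pyArrGetD_pyArrSetD (xs : Array Int) {i : Int} (m v d : Int)
    (h0 : 0 ≤ i) (hlt : i.toNat < xs.size) :
    pyArrGetD (pyArrSetD xs i v) m d = if m = i then v else pyArrGetD xs m d := by
  have hset : pyArrSetD xs i v = xs.set i.toNat v hlt := by
    unfold pyArrSetD; rw [dif_pos ⟨h0, hlt⟩]
  rw [hset]
  unfold pyArrGetD
  by_cases hm : 0 ≤ m ∧ m.toNat < xs.size
  · rw [dif_pos (by simpa using hm), dif_pos hm, Array.getElem_set]
    by_cases he : m = i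
    · rw [if_pos (by omega), if_pos he]
    · rw [if_neg (by omega), if_neg he]
  · rw [dif_neg (by simpa using hm), dif_neg hm, if_neg (by intro he; exact hm ⟨he ▸ h0, he ▸ hlt⟩)]

-- xs[i] += 1 is a get followed by a set
theorem pyArrIncD_eq (xs : Array Int) (i : Int) :
    pyArrIncD xs i = pyArrSetD xs i (pyArrGetD xs i 0 + 1) := by
  unfold pyArrIncD pyArrSetD pyArrGetD
  by_cases h : 0 ≤ i ∧ i.toNat < xs.size
  · rw [dif_pos h, dif_pos h, dif_pos h]
  · rw [dif_neg h, dif_neg h]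

-- A's loop, abstracted: reading position a-1 after the fold adds the number of i in l with i + dsum i = a
theorem loop_count (a : Int) (l : List Int) :
    ∀ (s : Array Int), s.size = a.toNat → (∀ i ∈ l, 1 ≤ i) →
    pyArrGetD
      (l.foldl (fun sn i =>
        let checknum := (PySem.Int.toStr i).toList.foldl (fun c j => c + pyDig j) i
        if checknum ≤ a then pyArrIncD sn (checknum - 1)
        else sn) s) (a - 1) 0
      = pyArrGetD s (a - 1) 0 + (l.countP (fun i => i + dsum i == a) : Int) := by
  induction l with
  | nil => intro s _ _; simp
  | cons x t ih =>
    intro s hlen hpos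
    have hx1 : 1 ≤ x := hpos x (by simp)
    have hds := dsum_bounds hx1
    simp only [List.foldl_cons, List.countP_cons]
    rw [PySem.List.foldl_add]
    have hchk : x + ((PySem.Int.toStr x).toList.map pyDig).sum = x + dsum x := rfl
    rw [hchk]
    by_cases hle : x + dsum x ≤ a
    · rw [if_pos hle]
      have ha1 : 1 ≤ a := by omega
      have hlt : (x + dsum x - 1).toNat < s.size := by omega
      rw [pyArrIncD_eq]
      rw [ih _ (by rw [size_pyArrSetD]; exact hlen)
            (fun i hi => hpos i (by simp [hi]))]
      rw [pyArrGetD_pyArrSetD _ _ _ _ (by omega) hlt]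
      by_cases heq : x + dsum x = a
      · rw [if_pos (by omega), if_pos (by simpa using heq)]
        have h1 : x + dsum x - 1 = a - 1 := by omega
        rw [h1]
        push_cast
        ring
      · rw [if_neg (by omega), if_neg (by simpa using heq)]
        push_cast
        ring
    · rw [if_neg hle]
      rw [ih _ hlen (fun i hi => hpos i (by simp [hi]))]
      rw [if_neg (by simp; omega)]
      push_cast
      ring

-- the initial array holds 0 at position a-1
theorem init_zero {a : Int} (ha : 2 ≤ a) :
    pyArrGetD (pyArrSetD (Array.replicate a.toNat 0) 1 0) (a - 1) 0 = 0 := by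
  rw [pyArrGetD_pyArrSetD _ _ _ _ (by omega) (by simp; omega)]
  unfold pyArrGetD
  split
  · simp
  · split <;> simp_all [Array.getElem_replicate]

-- A as a count over range(1, a)
theorem solution_eq_count {a : Int} (ha : 2 ≤ a) :
    solution a = ((PySem.List.pyRange 1 a).countP (fun i => i + dsum i == a) : Int) := by
  unfold solution
  rw [loop_count a _ _
        (by simp [size_pyArrSetD])
        (fun i hi => (PySem.List.mem_pyRange_one.1 hi).1)]
  rw [init_zero ha, zero_add]

-- B as a count over range(lo, a)
theorem solution_alt_eq_count (a : Int) :
    solution_alt a = ((PySem.List.pyRange (max 1 (a - 9 * PySem.Str.len (PySem.Int.toStr a))) a).countP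
      (fun i => i + dsum i == a) : Int) := by
  unfold solution_alt
  rw [PySem.List.foldl_if_add_one, zero_add]
  congr 1
  exact List.countP_congr (fun i _ => by rw [digitsum_eq])

-- below the window the test i + dsum i == a never fires
theorem no_hit_below {a i : Int} (ha : 2 ≤ a) (hi1 : 1 ≤ i)
    (hi : i < a - 9 * PySem.Str.len (PySem.Int.toStr a)) : ¬ (i + dsum i = a) := by
  have hlen : PySem.Str.len (PySem.Int.toStr a) = ((Nat.toDigits 10 a.toNat).length : Int) := by
    rw [PySem.Str.len_eq, PySem.Int.toList_toStr]
    unfold PySem.Int.toChars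
    rw [if_neg (by omega)]
  have hia : i ≤ a := by
    have := (dsum_bounds hi1).1
    nlinarith [Nat.length_toDigits_pos (b := 10) (n := a.toNat), hlen]
  have hmono : ((Nat.toDigits 10 i.toNat).length : Int) ≤ ((Nat.toDigits 10 a.toNat).length : Int) := by
    exact_mod_cast toDigits_len_mono (by omega)
  have hb := (dsum_bounds hi1).2
  rw [hlen] at hi
  omega

theorem solution_spec' {a : Int} (ha : 2 ≤ a) : solution a = solution_alt a := by
  rw [solution_eq_count ha, solution_alt_eq_count a]
  set lo := max 1 (a - 9 * PySem.Str.len (PySem.Int.toStr a)) with hlo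
  have h1 : (1 : Int) ≤ lo := le_max_left _ _
  have hloa : lo ≤ a := by
    have hlen : 1 ≤ PySem.Str.len (PySem.Int.toStr a) := by
      rw [PySem.Str.len_eq, PySem.Int.toList_toStr]
      unfold PySem.Int.toChars
      rw [if_neg (by omega)]
      exact_mod_cast Nat.length_toDigits_pos
    simp only [hlo, max_le_iff]
    omega
  rw [PySem.List.pyRange_one_append 1 lo a h1 hloa, List.countP_append]
  have hzero : (PySem.List.pyRange 1 lo).countP (fun i => i + dsum i == a) = 0 := by
    rw [List.countP_eq_zero]
    intro i hi
    obtain ⟨hi1, hi2⟩ := PySem.List.mem_pyRange_one.1 hi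
    have : i < a - 9 * PySem.Str.len (PySem.Int.toStr a) := by
      have := lt_of_lt_of_le hi2 (le_refl lo)
      simp only [hlo] at hi2
      rcases max_cases 1 (a - 9 * PySem.Str.len (PySem.Int.toStr a)) with ⟨h, _⟩ | ⟨h, _⟩ <;> omega
    simpa using no_hit_below ha hi1 this
  rw [hzero]
  simp

-- ===== VERDICT (by name: the statement is the Claim_ definition above) =====
theorem solution_spec : Claim_equal_solution := by
  intro a _ hpre
  unfold Spec_solution
  exact solution_spec' hpre
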